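-- pv_equiv track=rewrite | github.com/cipher813/alpha-engine-research | agents/sector_teams/team_config.py | _get_team_rating
-- ===== SOURCE A (Python) =====
-- def _get_team_rating(
--     sectors: list[str],
--     sector_ratings: dict[str, dict],
-- ) -> str:
--     """Return the best sector rating across a team's sectors."""
--     ratings = []
--     for sector in sectors:
--         rating_data = sector_ratings.get(sector, {})
--         ratings.append(rating_data.get("rating", "market_weight"))
--
--     # Priority: overweight > market_weight > underweight
--     if "overweight" in ratings:
--         return "overweight"
--     if "market_weight" in ratings:
--         return "market_weight"
--     return "underweight"
-- ===== SOURCE B (Python) =====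
-- _PRIO = {"overweight": 2, "market_weight": 1}
--
-- def _get_team_rating(
--     sectors: list[str],
--     sector_ratings: dict[str, dict],
-- ) -> str:
--     """Return the best sector rating across a team's sectors (single max-priority pass)."""
--     best = 0
--     for sector in sectors:
--         rating = sector_ratings.get(sector, {}).get("rating", "market_weight")
--         best = max(best, _PRIO.get(rating, 0))
--     return "overweight" if best == 2 else ("market_weight" if best == 1 else "underweight")
-- ===== Notes on version B (the rewrite author's own statement) =====
-- stated objective: alternative
-- what changed: Replaces A's materialize-a-ratings-list-then-three-membership-scans with a single fold that maintains the maximum rating priority (via a priority map) and translates the numeric best back at the end.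
import Mathlib
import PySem

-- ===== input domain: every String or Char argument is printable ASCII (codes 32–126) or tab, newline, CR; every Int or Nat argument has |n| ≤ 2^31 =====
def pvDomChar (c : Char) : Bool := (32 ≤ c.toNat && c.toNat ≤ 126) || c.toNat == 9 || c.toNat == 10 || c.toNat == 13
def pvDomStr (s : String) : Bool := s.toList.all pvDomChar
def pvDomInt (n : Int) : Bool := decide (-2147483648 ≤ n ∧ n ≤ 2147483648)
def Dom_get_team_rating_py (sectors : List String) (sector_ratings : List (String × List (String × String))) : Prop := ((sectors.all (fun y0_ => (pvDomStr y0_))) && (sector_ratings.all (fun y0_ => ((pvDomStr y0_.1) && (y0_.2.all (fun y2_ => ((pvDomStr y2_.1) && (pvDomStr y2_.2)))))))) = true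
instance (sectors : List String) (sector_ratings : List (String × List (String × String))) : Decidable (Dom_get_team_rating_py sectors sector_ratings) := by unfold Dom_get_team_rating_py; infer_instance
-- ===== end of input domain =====

-- B: single fold maintaining the maximum rating priority instead of A's ratings list plus three membership scans (alternative decomposition; same O(n) cost).


-- ===== PORT A =====
-- rating_data = sector_ratings.get(sector, {}); rating_data.get("rating", "market_weight")
def pvRatingOf (sector_ratings : List (String × List (String × String))) (sector : String) : String :=
  match (PySem.Dict.mk sector_ratings).get? sector with
  | some rating_data => ((PySem.Dict.mk rating_data).get? "rating").getD "market_weight"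
  | none => "market_weight"

def get_team_rating_py (sectors : List String) (sector_ratings : List (String × List (String × String))) : String :=
  let ratings := sectors.foldl (fun acc sector => acc ++ [pvRatingOf sector_ratings sector]) []
  if ratings.contains "overweight" then "overweight"
  else if ratings.contains "market_weight" then "market_weight"
  else "underweight"

-- ===== PORT B =====
def pvPrioDict : PySem.Dict String Nat := PySem.Dict.mk [("overweight", 2), ("market_weight", 1)]

def get_team_rating_py_alt (sectors : List String) (sector_ratings : List (String × List (String × String))) : String :=
  let best := sectors.foldl (fun best sector =>
    max best (pvPrioDict.getD (pvRatingOf sector_ratings sector) 0)) 0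
  if best = 2 then "overweight" else if best = 1 then "market_weight" else "underweight"

-- ===== PRECONDITION & SPEC =====
def Spec_get_team_rating_py (sectors : List String) (sector_ratings : List (String × List (String × String))) (out : String) : Prop := out = get_team_rating_py_alt sectors sector_ratings
instance (sectors : List String) (sector_ratings : List (String × List (String × String))) (out : String) : Decidable (Spec_get_team_rating_py sectors sector_ratings out) := by unfold Spec_get_team_rating_py; infer_instance

-- ===== CLAIM (what is proved, stated in full; the proofs are below) =====
def Claim_equal_get_team_rating_py : Prop := ∀ (sectors : List String) (sector_ratings : List (String × List (String × String))), Dom_get_team_rating_py sectors sector_ratings → Spec_get_team_rating_py sectors sector_ratings (get_team_rating_py sectors sector_ratings)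

-- ===== LEMMAS AND PROOFS =====
theorem pvPrio_eq (x : String) :
    pvPrioDict.getD x 0 = if x = "overweight" then 2 else if x = "market_weight" then 1 else 0 := by
  simp only [pvPrioDict, PySem.Dict.getD, PySem.Dict.get?_mk_cons, beq_iff_eq]
  by_cases h1 : x = "overweight"
  · subst h1; rfl
  · by_cases h2 : x = "market_weight"
    · subst h2; rfl
    · rw [if_neg (fun h => h1 h.symm), if_neg (fun h => h2 h.symm), if_neg h1, if_neg h2]
      simp [PySem.Dict.get?]

theorem pv_fold_best (r : String → String) :
    ∀ (l : List String) (b : Nat),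
      l.foldl (fun best sector => max best (pvPrioDict.getD (r sector) 0)) b =
      if (l.map r).contains "overweight" then max b 2
      else if (l.map r).contains "market_weight" then max b 1
      else b := by
  intro l
  induction l with
  | nil => intro b; simp
  | cons s t ih =>
    intro b
    simp only [List.foldl_cons, List.map_cons, List.contains_cons, ih]
    rw [pvPrio_eq]
    by_cases h1 : r s = "overweight" <;> by_cases h2 : r s = "market_weight" <;>
      simp [h1, h2] <;> split_ifs <;> first | omega | aesop

-- ===== VERDICT (by name: the statement is the Claim_ definition above) =====
theorem get_team_rating_py_spec : Claim_equal_get_team_rating_py := by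
  intro sectors sr _
  unfold Spec_get_team_rating_py get_team_rating_py get_team_rating_py_alt
  rw [PySem.List.foldl_append_singleton_eq_map, pv_fold_best]
  simp only [List.nil_append]
  by_cases h1 : (sectors.map (pvRatingOf sr)).contains "overweight" = true
  · rw [if_pos h1, if_pos h1]; norm_num
  · rw [if_neg h1, if_neg h1]
    by_cases h2 : (sectors.map (pvRatingOf sr)).contains "market_weight" = true
    · rw [if_pos h2, if_pos h2]; norm_num
    · rw [if_neg h2, if_neg h2]; norm_num
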